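-- pv_equiv track=rewrite | github.com/kumarAbhi23/dsa-bc | DSA_/String/05_AreAscending.py | areNumbersAscending
-- ===== SOURCE A (Python) =====
-- def areNumbersAscending(s):
--     # we first split the string into tokens using split() method
--     tokens=s.split() # it will take O(n) time complexity and O(n)
--     #space complexity because we are creating a list of tokens from the string
--     # it will return list of string
--     # take a least number
--     prev = float('-inf')
--     for token in tokens:
--         if token.isdigit(): # method used to check a string contains a number (0-9) strig.isdidgit()
--             num = int (token)
--             if num<=prev:
--                 return False
--             prev=num
--
--     return True
--
-- s="5 box has 3 blue 4 red 6 green and 12 yellow marbles"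
-- ===== SOURCE B (Python) =====
-- def areNumbersAscending(s):
--     nums = [int(t) for t in s.split() if t.isdigit()]
--     return nums == sorted(set(nums))
-- ===== Notes on version B (the rewrite author's own statement) =====
-- stated objective: alternative
-- what changed: B replaces A's running-prev scan with early return by a sort/set characterization: it extracts the numbers once and returns whether the list equals the sorted list of its distinct values (strictly ascending iff nums == sorted(set(nums))).
import Mathlib
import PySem

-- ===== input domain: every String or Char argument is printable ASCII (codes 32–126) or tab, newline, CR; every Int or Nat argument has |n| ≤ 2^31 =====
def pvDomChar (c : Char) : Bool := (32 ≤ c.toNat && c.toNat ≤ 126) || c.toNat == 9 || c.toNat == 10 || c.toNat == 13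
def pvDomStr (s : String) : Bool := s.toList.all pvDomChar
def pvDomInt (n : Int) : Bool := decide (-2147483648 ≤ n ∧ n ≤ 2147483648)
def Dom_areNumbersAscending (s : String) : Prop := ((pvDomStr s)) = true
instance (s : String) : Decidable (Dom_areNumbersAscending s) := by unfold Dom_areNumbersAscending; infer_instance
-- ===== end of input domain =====

-- B drops A's running-prev scan with early return and instead checks the sort/set
-- characterization: the extracted numbers are strictly ascending iff the list equals
-- the sorted list of its distinct values (nums == sorted(set(nums))). Same result, different algorithm.

-- ===== PORT A =====
-- prev = float('-inf') is modelled as Option Int (none = -inf, smaller than every int).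
-- On ASCII input token.isdigit() guarantees int(token) succeeds, so getD 0 is never taken.
def areNumbersAscendingGo : List String → Option Int → Bool
  | [], _ => true
  | t :: ts, prev =>
    if PySem.Str.strIsdigit t then
      let num := (PySem.Int.ofStr? t).getD 0
      if (match prev with | none => false | some p => decide (num ≤ p)) then false
      else areNumbersAscendingGo ts (some num)
    else areNumbersAscendingGo ts prev

def areNumbersAscending (s : String) : Bool :=
  areNumbersAscendingGo (PySem.Str.split₀ s) none

-- ===== PORT B =====
def areNumbersAscending_alt (s : String) : Bool :=
  let nums := ((PySem.Str.split₀ s).filter PySem.Str.strIsdigit).map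
    (fun t => (PySem.Int.ofStr? t).getD 0)
  decide (nums = PySem.List.sorted (PySem.Set.ofList nums) (fun x => x) false)

-- ===== PRECONDITION & SPEC =====
def Spec_areNumbersAscending (s : String) (out : Bool) : Prop := out = areNumbersAscending_alt s
instance (s : String) (out : Bool) : Decidable (Spec_areNumbersAscending s out) := by unfold Spec_areNumbersAscending; infer_instance

-- ===== CLAIM (what is proved, stated in full; the proofs are below) =====
def Claim_equal_areNumbersAscending : Prop := ∀ (s : String), Dom_areNumbersAscending s → Spec_areNumbersAscending s (areNumbersAscending s)

-- ===== LEMMAS AND PROOFS =====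

-- A's scan, characterized: areNumbersAscendingGo ts prev is true iff the extracted
-- numbers, prefixed by prev (if any), are pairwise strictly increasing.
def pvChkFrom (prev : Option Int) (l : List Int) : Bool :=
  (match prev, l with
   | some p, n :: _ => decide (p < n)
   | _, _ => true) && decide (l.Pairwise (· < ·))

-- seeding the check with a previous value = pairwise on the consed list (by transitivity)
theorem chk_cons (num : Int) (l : List Int) :
    pvChkFrom (some num) l = decide ((num :: l).Pairwise (· < ·)) := by
  cases l with
  | nil => simp [pvChkFrom]
  | cons b r =>
    rw [Bool.eq_iff_iff]
    simp only [pvChkFrom, Bool.and_eq_true, decide_eq_true_eq, List.pairwise_cons]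
    constructor
    · rintro ⟨h1, h2, h3⟩
      refine ⟨fun a ha => ?_, h2, h3⟩
      rcases List.mem_cons.mp ha with rfl | ha
      · exact h1
      · exact lt_trans h1 (h2 a ha)
    · rintro ⟨h1, h2, h3⟩
      exact ⟨h1 b (by simp), h2, h3⟩

theorem goA_eq_chkFrom (ts : List String) (prev : Option Int) :
    areNumbersAscendingGo ts prev
      = pvChkFrom prev ((ts.filter PySem.Str.strIsdigit).map
          (fun t => (PySem.Int.ofStr? t).getD 0)) := by
  induction ts generalizing prev with
  | nil => cases prev <;> simp [areNumbersAscendingGo, pvChkFrom]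
  | cons t ts ih =>
    by_cases hd : PySem.Str.strIsdigit t
    · simp only [areNumbersAscendingGo, hd, if_true, List.filter_cons_of_pos hd, List.map_cons]
      set num := (PySem.Int.ofStr? t).getD 0 with hn
      set rest := (ts.filter PySem.Str.strIsdigit).map
          (fun t => (PySem.Int.ofStr? t).getD 0) with hr
      cases prev with
      | none =>
        simp only [Bool.false_eq_true, if_false, ih, chk_cons]
        cases rest <;> simp [pvChkFrom]
      | some p =>
        by_cases hle : num ≤ p
        · have hnp : ¬ p < num := by omega
          cases rest <;> simp [pvChkFrom, hle, hnp]
        · have hlt : p < num := by omega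
          rw [if_neg (by simp [hle]), ih, chk_cons]
          simp [pvChkFrom, hlt]
    · simp only [areNumbersAscendingGo, hd, List.filter_cons_of_neg hd]
      exact ih prev

-- B's sort/set test, characterized: l = sorted(set(l)) iff l is strictly increasing.
theorem sortedSet_iff_pairwise (l : List Int) :
    (l = PySem.List.sorted (PySem.Set.ofList l) (fun x => x) false) ↔ l.Pairwise (· < ·) := by
  constructor
  · intro h
    rw [h]
    exact PySem.List.sorted_ofList_pairwise_lt l
  · intro hp
    have hnd : l.Nodup := hp.nodup.imp (fun {a b} h => by omega)
    rw [PySem.Set.ofList_eq_self_of_nodup _ hnd]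
    exact (PySem.List.sorted_eq_self_of_pairwise l (fun x => x) (hp.imp (fun {a b} h => le_of_lt h))).symm

-- ===== VERDICT (by name: the statement is the Claim_ definition above) =====
theorem areNumbersAscending_spec : Claim_equal_areNumbersAscending := by
  intro s _
  unfold Spec_areNumbersAscending areNumbersAscending areNumbersAscending_alt
  rw [goA_eq_chkFrom]
  simp [pvChkFrom, sortedSet_iff_pairwise]
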